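-- pv_equiv track=rewrite | github.com/Azargaz/Advent-of-Code-2019 | day-8/decode.py | getImageFromData
-- ===== SOURCE A (Python) =====
-- def getImageFromData(input, width, height):
--     image = []
--     layer = []
--     row = []
--
--     currentWidth = 0
--     currentHeight = 0
--
--     for char in input:
--         # append characters to row until it reaches the image's width
--         if currentWidth < width:
--             row.append(char)
--             currentWidth += 1
--
--         # if row is the width of image then append new row to layer and reset row array
--         if currentWidth == width:
--             layer.append(row)
--             row = []
--             currentWidth = 0
--
--             currentHeight += 1
--             # if layer is the height of image then append new layer to image and reset layer array
--             if currentHeight == height: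
--                 image.append(layer)
--                 layer = []
--                 currentHeight = 0
--
--     return image
-- ===== SOURCE B (Python) =====
-- def getImageFromData(input, width, height):
--     if width <= 0 or height <= 0:
--         return []
--     flat = list(input)
--     per = width * height
--     image = []
--     while len(flat) >= per:
--         block, flat = flat[:per], flat[per:]
--         layer = []
--         while block:
--             layer.append(block[:width])
--             block = block[width:]
--         image.append(layer)
--     return image
-- ===== Notes on version B (the rewrite author's own statement) =====
-- stated objective: simpler
-- what changed: Replaced the per-character currentWidth/currentHeight counter state machine with block slicing: cut the flat data into width*height-sized layer blocks and each block into width-sized rows (bulk list slices instead of per-character appends), discarding incomplete trailing data by construction.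
-- intended difference: When width == 0 and 0 < height <= len(input), A returns len(input)//height layers each made of height empty rows (an accident of its counters: an empty row completes on every character), while B returns [], the intended result for a degenerate zero-width image. — e.g. on getImageFromData("ab", 0, 2): A returns [[[], []]], B returns []
import Mathlib
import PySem

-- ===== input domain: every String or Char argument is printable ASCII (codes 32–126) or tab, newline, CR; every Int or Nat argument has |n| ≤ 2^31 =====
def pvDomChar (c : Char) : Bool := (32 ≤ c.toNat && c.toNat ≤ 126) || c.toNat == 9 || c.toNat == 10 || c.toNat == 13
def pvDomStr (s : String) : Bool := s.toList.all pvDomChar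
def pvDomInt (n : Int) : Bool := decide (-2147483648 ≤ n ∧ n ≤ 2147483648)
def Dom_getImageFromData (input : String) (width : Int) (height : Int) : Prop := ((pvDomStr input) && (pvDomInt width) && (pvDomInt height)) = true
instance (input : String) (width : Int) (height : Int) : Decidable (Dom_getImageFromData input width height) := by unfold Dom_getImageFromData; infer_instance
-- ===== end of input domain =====

-- B replaces A's per-character width/height counter state machine by slicing the flat data
-- into width*height blocks and each block into width-sized rows (objective: simpler).

-- ===== PORT A =====
-- one loop iteration of A: state = (image, layer, row, currentWidth, currentHeight)
def pvStepA (width height : Int)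
    (st : List (List (List String)) × List (List String) × List String × Int × Int)
    (c : String) : List (List (List String)) × List (List String) × List String × Int × Int :=
  let (image, layer, row, cw, ch) := st
  let (row', cw') := if cw < width then (row ++ [c], cw + 1) else (row, cw)
  if cw' = width then
    let layer' := layer ++ [row']
    let ch' := ch + 1
    if ch' = height then (image ++ [layer'], [], ([] : List String), 0, 0)
    else (image, layer', ([] : List String), 0, ch')
  else (image, layer, row', cw', ch)

def getImageFromData (input : String) (width : Int) (height : Int) : List (List (List String)) :=
  ((input.toList.map (fun c => String.mk [c])).foldl (pvStepA width height)
    ([], [], [], 0, 0)).1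

-- ===== PORT B =====
-- inner while loop of B: slice a layer block into rows of wN characters
-- (the `wN = 0` guard only makes the recursion total; B calls it with wN > 0)
def pvRowsB (block : List String) (wN : Nat) : List (List String) :=
  if h : block = [] ∨ wN = 0 then []
  else block.take wN :: pvRowsB (block.drop wN) wN
termination_by block.length
decreasing_by
  rcases block with _ | ⟨x, xs⟩
  · simp at h
  · simp only [List.length_drop, List.length_cons]
    have : ¬ wN = 0 := fun h0 => h (Or.inr h0)
    omega

-- outer while loop of B: peel off full layer blocks of `per` characters
-- (the `0 < per` conjunct only makes the recursion total; B calls it with per > 0)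
def pvLayersB (flat : List String) (per wN : Nat) : List (List (List String)) :=
  if h : per ≤ flat.length ∧ 0 < per then
    pvRowsB (flat.take per) wN :: pvLayersB (flat.drop per) per wN
  else []
termination_by flat.length
decreasing_by simp only [List.length_drop]; omega

def getImageFromData_alt (input : String) (width : Int) (height : Int) : List (List (List String)) :=
  if width ≤ 0 ∨ height ≤ 0 then []
  else pvLayersB (input.toList.map (fun c => String.mk [c])) (width.toNat * height.toNat) width.toNat

-- ===== PRECONDITION & SPEC =====
-- When width == 0 and 0 < height ≤ len(input), A returns len(input)//height layers each made of
-- height empty rows (an accident of its counters: an empty row "completes" on every character),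
-- while B returns [], the intended result for a degenerate zero-width image.
def D_getImageFromData (input : String) (width : Int) (height : Int) : Prop :=
  width = 0 ∧ 0 < height ∧ height ≤ (input.length : Int)
instance (input : String) (width : Int) (height : Int) : Decidable (D_getImageFromData input width height) := by
  unfold D_getImageFromData; infer_instance

def Spec_getImageFromData (input : String) (width : Int) (height : Int) (out : List (List (List String))) : Prop :=
  ¬ D_getImageFromData input width height → out = getImageFromData_alt input width height
instance (input : String) (width : Int) (height : Int) (out : List (List (List String))) : Decidable (Spec_getImageFromData input width height out) := by
  unfold Spec_getImageFromData; infer_instance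

def pvDiffWitness_getImageFromData : String × Int × Int := ("ab", 0, 2)
def pvDiffWitnessOut_getImageFromData : (List (List (List String))) × (List (List (List String))) :=
  ([[[], []]], [])

-- ===== CLAIM (what is proved, stated in full; the proofs are below) =====
def Claim_unchanged_getImageFromData : Prop := ∀ (input : String) (width : Int) (height : Int), Dom_getImageFromData input width height → Spec_getImageFromData input width height (getImageFromData input width height)
def Claim_changed_getImageFromData : Prop := Dom_getImageFromData (pvDiffWitness_getImageFromData.1) (pvDiffWitness_getImageFromData.2.1) (pvDiffWitness_getImageFromData.2.2) ∧ D_getImageFromData (pvDiffWitness_getImageFromData.1) (pvDiffWitness_getImageFromData.2.1) (pvDiffWitness_getImageFromData.2.2) ∧ getImageFromData (pvDiffWitness_getImageFromData.1) (pvDiffWitness_getImageFromData.2.1) (pvDiffWitness_getImageFromData.2.2) = pvDiffWitnessOut_getImageFromData.1 ∧ getImageFromData_alt (pvDiffWitness_getImageFromData.1) (pvDiffWitness_getImageFromData.2.1) (pvDiffWitness_getImageFromData.2.2) = pvDiffWitnessOut_getImageFromData.2 ∧ pvDiffWitnessOut_getImageFromData.1 ≠ pvDiffWitnessOut_getIm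ageFromData.2
def Claim_exact_getImageFromData : Prop := ∀ (input : String) (width : Int) (height : Int), Dom_getImageFromData input width height → D_getImageFromData input width height → getImageFromData input width height ≠ getImageFromData_alt input width height

-- ===== LEMMAS AND PROOFS =====

-- the step on an explicit tuple, cw < width, row not completed
theorem pvStepA_mid (w h : Int) (im : List (List (List String))) (ly : List (List String))
    (row : List String) (cw ch : Int) (c : String) (h1 : cw < w) (h2 : cw + 1 ≠ w) :
    pvStepA w h (im, ly, row, cw, ch) c = (im, ly, row ++ [c], cw + 1, ch) := by
  simp [pvStepA, h1, h2]

-- the step completing a row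
theorem pvStepA_row (w h : Int) (im : List (List (List String))) (ly : List (List String))
    (row : List String) (cw ch : Int) (c : String) (h1 : cw < w) (h2 : cw + 1 = w) :
    pvStepA w h (im, ly, row, cw, ch) c =
      if ch + 1 = h then (im ++ [ly ++ [row ++ [c]]], [], [], 0, 0)
      else (im, ly ++ [row ++ [c]], [], 0, ch + 1) := by
  simp [pvStepA, h1, h2]

-- filling a row without completing it
theorem fillA (w h : Int) (cs : List String) : ∀ (im : List (List (List String)))
    (ly : List (List String)) (row : List String) (cw ch : Int),
    cw + cs.length < w →
    List.foldl (pvStepA w h) (im, ly, row, cw, ch) cs = (im, ly, row ++ cs, cw + cs.length, ch) := by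
  induction cs with
  | nil => intro im ly row cw ch _; simp
  | cons c cs ih =>
    intro im ly row cw ch hlt
    have hl : ((c :: cs).length : Int) = cs.length + 1 := by push_cast [List.length_cons]; ring
    have h1 : cw < w := by rw [hl] at hlt; have := Int.natCast_nonneg cs.length; omega
    have h2 : cw + 1 ≠ w := by rw [hl] at hlt; have := Int.natCast_nonneg cs.length; omega
    rw [List.foldl_cons, pvStepA_mid w h im ly row cw ch c h1 h2,
      ih im ly (row ++ [c]) (cw + 1) ch (by rw [hl] at hlt; push_cast; omega)]
    rw [List.append_assoc]
    have : cw + 1 + (cs.length : Int) = cw + ((c :: cs).length : Int) := by push_cast [List.length_cons]; ring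
    rw [this]
    rfl

-- consuming exactly the rest of a row completes it
theorem rowA (w h : Int) (cs : List String) : ∀ (im : List (List (List String)))
    (ly : List (List String)) (row : List String) (cw ch : Int),
    cw < w → cw + cs.length = w →
    List.foldl (pvStepA w h) (im, ly, row, cw, ch) cs =
      if ch + 1 = h then (im ++ [ly ++ [row ++ cs]], [], [], 0, 0)
      else (im, ly ++ [row ++ cs], [], 0, ch + 1) := by
  induction cs with
  | nil => intro im ly row cw ch h1 h2; simp at h2; omega
  | cons c cs ih =>
    intro im ly row cw ch h1 h2
    cases cs with
    | nil =>
      have h2' : cw + 1 = w := by simpa using h2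
      simp only [List.foldl_cons, List.foldl_nil]
      rw [pvStepA_row w h im ly row cw ch c h1 h2']
    | cons d ds =>
      have hl : ((c :: d :: ds).length : Int) = ((d :: ds).length : Int) + 1 := by push_cast [List.length_cons]; ring
      have hd : (1:Int) ≤ ((d :: ds).length : Int) := by
        have : 1 ≤ (d :: ds).length := by simp
        exact_mod_cast this
      have h1' : cw + 1 < w := by rw [hl] at h2; omega
      have h2m : cw + 1 ≠ w := by omega
      rw [List.foldl_cons, pvStepA_mid w h im ly row cw ch c h1 h2m,
        ih im ly (row ++ [c]) (cw + 1) ch h1' (by rw [hl] at h2; omega)]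
      rw [List.append_assoc]
      rfl


-- pvRowsB / pvLayersB unfolding equations
theorem pvRowsB_cons (cs : List String) (wN : Nat) (h1 : cs ≠ []) (h2 : wN ≠ 0) :
    pvRowsB cs wN = cs.take wN :: pvRowsB (cs.drop wN) wN := by
  rw [pvRowsB, dif_neg (fun hor => hor.elim h1 h2)]

theorem pvRowsB_nil (wN : Nat) : pvRowsB [] wN = [] := by
  rw [pvRowsB, dif_pos (Or.inl rfl)]

theorem pvLayersB_cons (flat : List String) (per wN : Nat) (h1 : per ≤ flat.length) (h2 : 0 < per) :
    pvLayersB flat per wN = pvRowsB (flat.take per) wN :: pvLayersB (flat.drop per) per wN := by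
  rw [pvLayersB, dif_pos ⟨h1, h2⟩]

theorem pvLayersB_nil (flat : List String) (per wN : Nat) (h : ¬ (per ≤ flat.length ∧ 0 < per)) :
    pvLayersB flat per wN = [] := by
  rw [pvLayersB, dif_neg h]

-- while fewer than a full layer of rows completes, the image component does not grow
theorem noLayerA (w h : Int) (hw : 0 < w) : ∀ (n : Nat) (cs : List String), cs.length = n →
    ∀ (im : List (List (List String))) (ly : List (List String)) (ch : Int), 0 ≤ ch →
    (h ≤ 0 ∨ ch + ((n / w.toNat : Nat) : Int) < h) →
    (List.foldl (pvStepA w h) (im, ly, [], 0, ch) cs).1 = im := by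
  intro n
  induction n using Nat.strong_induction_on with
  | _ n IH =>
    intro cs hlen im ly ch hch hcond
    have hwc : ((w.toNat : Nat) : Int) = w := Int.toNat_of_nonneg hw.le
    by_cases hsmall : n < w.toNat
    · rw [fillA w h cs im ly [] 0 ch (by rw [hlen]; omega)]
    · push_neg at hsmall
      nth_rewrite 1 [(List.take_append_drop w.toNat cs).symm]
      rw [List.foldl_append]
      have htk : (cs.take w.toNat).length = w.toNat := by rw [List.length_take]; omega
      rw [rowA w h (cs.take w.toNat) im ly [] 0 ch hw (by rw [htk]; omega)]
      have hq : n / w.toNat = (n - w.toNat) / w.toNat + 1 :=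
        Nat.div_eq_sub_div (by omega) hsmall
      have hne : ¬ (ch + 1 = h) := by
        rcases hcond with hc | hc
        · omega
        · rw [hq] at hc
          generalize (n - w.toNat) / w.toNat = q at hc
          omega
      rw [if_neg hne]
      exact IH (n - w.toNat) (by omega) (cs.drop w.toNat) (by rw [List.length_drop]; omega)
        im (ly ++ [[] ++ cs.take w.toNat]) (ch + 1) (by omega)
        (by rcases hcond with hc | hc
            · exact Or.inl hc
            · right; rw [hq] at hc
              generalize (n - w.toNat) / w.toNat = q at hc ⊢
              omega)

-- consuming exactly k+1 full rows of a fresh layer flushes one layer, sliced as pvRowsB slices it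
theorem layerA (w h : Int) (hw : 0 < w) : ∀ (k : Nat) (cs : List String)
    (im : List (List (List String))) (ly : List (List String)) (c : Int),
    c + ((k : Int) + 1) = h → cs.length = w.toNat * (k + 1) →
    List.foldl (pvStepA w h) (im, ly, [], 0, c) cs =
      (im ++ [ly ++ pvRowsB cs w.toNat], [], [], 0, 0) := by
  have hwN : w.toNat ≠ 0 := by omega
  have hwc : ((w.toNat : Nat) : Int) = w := Int.toNat_of_nonneg hw.le
  intro k
  induction k with
  | zero =>
    intro cs im ly c hc hlen
    have hlen' : cs.length = w.toNat := by omega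
    rw [rowA w h cs im ly [] 0 c hw (by rw [hlen']; omega)]
    have hch : c + 1 = h := by push_cast at hc; omega
    rw [if_pos hch]
    have hne : cs ≠ [] := by intro e; rw [e] at hlen'; simp at hlen'; omega
    rw [pvRowsB_cons cs w.toNat hne hwN,
      List.take_of_length_le (le_of_eq hlen'),
      List.drop_eq_nil_of_le (le_of_eq hlen'), pvRowsB_nil]
    rfl
  | succ k ihk =>
    intro cs im ly c hc hlen
    have hge : w.toNat ≤ cs.length := by
      rw [hlen]; have : w.toNat * (k + 1 + 1) = w.toNat * (k + 1) + w.toNat := by ring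
      omega
    have hne : cs ≠ [] := by intro e; rw [e] at hge; simp at hge; omega
    rw [pvRowsB_cons cs w.toNat hne hwN]
    nth_rewrite 1 [(List.take_append_drop w.toNat cs).symm]
    rw [List.foldl_append]
    have htk : (cs.take w.toNat).length = w.toNat := by rw [List.length_take]; omega
    rw [rowA w h (cs.take w.toNat) im ly [] 0 c hw (by rw [htk]; omega)]
    have hnh : ¬ (c + 1 = h) := by push_cast at hc; omega
    rw [if_neg hnh]
    rw [ihk (cs.drop w.toNat) im (ly ++ [[] ++ cs.take w.toNat]) (c + 1)
      (by push_cast at hc ⊢; omega)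
      (by rw [List.length_drop, hlen]
          have : w.toNat * (k + 1 + 1) = w.toNat * (k + 1) + w.toNat := by ring
          omega)]
    simp

-- the main characterisation: from a fresh state A's image is exactly B's layer slicing
theorem mainA (w h : Int) (hw : 0 < w) (hh : 0 < h) : ∀ (n : Nat) (cs : List String),
    cs.length = n → ∀ (im : List (List (List String))),
    (List.foldl (pvStepA w h) (im, [], [], 0, (0 : Int)) cs).1
      = im ++ pvLayersB cs (w.toNat * h.toNat) w.toNat := by
  intro n
  induction n using Nat.strong_induction_on with
  | _ n IH =>
    intro cs hlen im
    have hhc : ((h.toNat : Nat) : Int) = h := Int.toNat_of_nonneg hh.le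
    have hper : 0 < w.toNat * h.toNat := Nat.mul_pos (by omega) (by omega)
    by_cases hsmall : n < w.toNat * h.toNat
    · rw [pvLayersB_nil _ _ _ (by rintro ⟨h1, _⟩; omega), List.append_nil]
      apply noLayerA w h hw n cs hlen im [] 0 le_rfl
      right
      have hdiv : n / w.toNat < h.toNat := Nat.div_lt_of_lt_mul hsmall
      omega
    · push_neg at hsmall
      rw [pvLayersB_cons cs _ _ (by rw [hlen]; exact hsmall) hper]
      nth_rewrite 1 [(List.take_append_drop (w.toNat * h.toNat) cs).symm]
      rw [List.foldl_append]
      have hk : h.toNat - 1 + 1 = h.toNat := by omega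
      rw [layerA w h hw (h.toNat - 1) (cs.take (w.toNat * h.toNat)) im [] 0
        (by omega)
        (by rw [List.length_take, hk]; omega)]
      rw [IH (n - w.toNat * h.toNat) (by omega) (cs.drop (w.toNat * h.toNat))
        (by rw [List.length_drop]; omega) (im ++ [[] ++ pvRowsB (cs.take (w.toNat * h.toNat)) w.toNat])]
      simp

-- negative width: the state never changes
theorem negA (w h : Int) (hw : w < 0) (cs : List String) : ∀ (im : List (List (List String))) (ly : List (List String)) (row : List String) (ch : Int),
    List.foldl (pvStepA w h) (im, ly, row, 0, ch) cs = (im, ly, row, 0, ch) := by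
  induction cs with
  | nil => intro im ly row ch; rfl
  | cons c cs ih =>
    intro im ly row ch
    rw [List.foldl_cons,
      show pvStepA w h (im, ly, row, 0, ch) c = (im, ly, row, 0, ch) from by
        simp [pvStepA, show ¬ (0:Int) < w by omega, show ¬ (0:Int) = w by omega],
      ih]

-- zero width, fewer than height characters (or height ≤ 0): no layer flushes
theorem zeroA (h : Int) (cs : List String) : ∀ (im : List (List (List String)))
    (ly : List (List String)) (ch : Int), 0 ≤ ch →
    (h ≤ 0 ∨ ch + (cs.length : Int) < h) →
    (List.foldl (pvStepA 0 h) (im, ly, [], 0, ch) cs).1 = im := by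
  induction cs with
  | nil => intro im ly ch _ _; rfl
  | cons c cs ih =>
    intro im ly ch hch hcond
    have hlc : ((c :: cs).length : Int) = (cs.length : Int) + 1 := by
      push_cast [List.length_cons]; ring
    have hne : ¬ (ch + 1 = h) := by
      rcases hcond with hc | hc
      · omega
      · rw [hlc] at hc; have := Int.natCast_nonneg cs.length; omega
    rw [List.foldl_cons,
      show pvStepA 0 h (im, ly, [], 0, ch) c = (im, ly ++ [[]], [], 0, ch + 1) from by
        simp [pvStepA, hne]]
    exact ih im (ly ++ [[]]) (ch + 1) (by omega)
      (by rcases hcond with hc | hc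
          · exact Or.inl hc
          · right; rw [hlc] at hc; omega)

-- the image component only ever grows
theorem monoA (w h : Int) (cs : List String) : ∀ (st : List (List (List String)) × List (List String) × List String × Int × Int),
    ∃ t, (List.foldl (pvStepA w h) st cs).1 = st.1 ++ t := by
  induction cs with
  | nil => intro st; exact ⟨[], by simp⟩
  | cons c cs ih =>
    intro st
    obtain ⟨t, ht⟩ := ih (pvStepA w h st c)
    obtain ⟨im, ly, row, cw, ch⟩ := st
    have hstep : ∃ u, (pvStepA w h (im, ly, row, cw, ch) c).1 = im ++ u := by
      by_cases h1 : cw < w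
      · by_cases h2 : cw + 1 = w
        · by_cases h3 : ch + 1 = h
          · exact ⟨[ly ++ [row ++ [c]]], by simp [pvStepA, h1, h2, h3]⟩
          · exact ⟨[], by simp [pvStepA, h1, h2, h3]⟩
        · exact ⟨[], by simp [pvStepA, h1, h2]⟩
      · by_cases h2 : cw = w
        · by_cases h3 : ch + 1 = h
          · exact ⟨[ly ++ [row]], by simp [pvStepA, h1, h2, h3]⟩
          · exact ⟨[], by simp [pvStepA, h1, h2, h3]⟩
        · exact ⟨[], by simp [pvStepA, h1, h2]⟩
    obtain ⟨u, hu⟩ := hstep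
    exact ⟨u ++ t, by rw [List.foldl_cons, ht, hu, List.append_assoc]⟩

-- zero width: k+1 characters from a fresh row flush one layer of k+1 empty rows
theorem zeroLayerA (h : Int) : ∀ (k : Nat) (cs : List String)
    (im : List (List (List String))) (ly : List (List String)) (c : Int),
    c + ((k : Int) + 1) = h → cs.length = k + 1 →
    List.foldl (pvStepA 0 h) (im, ly, [], 0, c) cs
      = (im ++ [ly ++ List.replicate (k + 1) ([] : List String)], [], [], 0, 0) := by
  intro k
  induction k with
  | zero =>
    intro cs im ly c hc hlen
    rcases cs with _ | ⟨d, ds⟩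
    · simp at hlen
    · have hds : ds = [] := by simpa using hlen
      subst hds
      have hch : c + 1 = h := by push_cast at hc; omega
      simp [pvStepA, hch]
  | succ k ihk =>
    intro cs im ly c hc hlen
    rcases cs with _ | ⟨d, ds⟩
    · simp at hlen
    · have hne : ¬ (c + 1 = h) := by push_cast at hc; omega
      rw [List.foldl_cons,
        show pvStepA 0 h (im, ly, [], 0, c) d = (im, ly ++ [[]], [], 0, c + 1) from by
          simp [pvStepA, hne]]
      rw [ihk ds im (ly ++ [[]]) (c + 1) (by push_cast at hc ⊢; omega) (by simpa using hlen)]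
      rw [show List.replicate (k + 1 + 1) ([] : List String)
            = [] :: List.replicate (k + 1) ([] : List String) from rfl]
      simp

-- ===== VERDICT (by name: the statement is the Claim_ definition above) =====
theorem getImageFromData_spec : Claim_unchanged_getImageFromData := by
  intro input w h _ hnD
  simp only [getImageFromData, getImageFromData_alt]
  rcases lt_trichotomy w 0 with hw | hw | hw
  · rw [negA w h hw, if_pos (Or.inl hw.le)]
  · subst hw
    rw [if_pos (Or.inl le_rfl)]
    have hcl : ((input.toList.map (fun c => String.mk [c])).length : Int) = (input.length : Int) := by
      simp
    apply zeroA h _ [] [] 0 le_rfl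
    by_cases hh : h ≤ 0
    · exact Or.inl hh
    · right
      push_neg at hh
      have hlt : (input.length : Int) < h := by
        by_contra hge
        exact hnD ⟨rfl, hh, by omega⟩
      omega
  · by_cases hh : h ≤ 0
    · rw [if_pos (Or.inr hh)]
      exact noLayerA w h hw (input.toList.map (fun c => String.mk [c])).length (input.toList.map (fun c => String.mk [c])) rfl [] [] 0 le_rfl (Or.inl hh)
    · push_neg at hh
      rw [if_neg (by rintro (hc | hc) <;> omega)]
      have := mainA w h hw hh (input.toList.map (fun c => String.mk [c])).length (input.toList.map (fun c => String.mk [c])) rfl []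
      simpa using this
theorem getImageFromData_changed : Claim_changed_getImageFromData := by
  unfold Claim_changed_getImageFromData; decide
theorem getImageFromData_tight : Claim_exact_getImageFromData := by
  intro input w h _ hD
  obtain ⟨hw0, hh, hlen⟩ := hD
  subst hw0
  rw [show getImageFromData_alt input 0 h = [] from by
    simp only [getImageFromData_alt]; rw [if_pos (Or.inl le_rfl)]]
  simp only [getImageFromData]
  have hcl : (input.toList.map (fun c => String.mk [c])).length = input.length := by simp
  have hge : h.toNat ≤ (input.toList.map (fun c => String.mk [c])).length := by
    rw [hcl]; omega
  nth_rewrite 1 [(List.take_append_drop h.toNat (input.toList.map (fun c => String.mk [c]))).symm]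
  rw [List.foldl_append]
  have hk : h.toNat - 1 + 1 = h.toNat := by omega
  rw [zeroLayerA h (h.toNat - 1) ((input.toList.map (fun c => String.mk [c])).take h.toNat) [] [] 0 (by omega)
    (by rw [List.length_take, hk]; omega)]
  obtain ⟨t, ht⟩ := monoA 0 h ((input.toList.map (fun c => String.mk [c])).drop h.toNat)
    ([] ++ [[] ++ List.replicate (h.toNat - 1 + 1) ([] : List String)], [], [], 0, 0)
  rw [ht]
  simp
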